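-- pv_equiv track=rewrite | github.com/z-haral/Halal-Checker | backend/scripts/risk_tagger.py | get_overall_risk
-- ===== SOURCE A (Python) =====
-- from typing import List, Dict, Tuple
--
-- def get_overall_risk(results: List[Dict]) -> str:
--     levels = [r['risk_level'] for r in results]
--     if 'high' in levels:
--         return 'high'
--     if 'medium' in levels:
--         return 'medium'
--     if 'low' in levels:
--         return 'low'
--     return 'unknown'
-- ===== SOURCE B (Python) =====
-- def get_overall_risk(results):
--     prio = {'high': 3, 'medium': 2, 'low': 1}
--     best = 0
--     for r in results:
--         best = max(best, prio.get(r['risk_level'], 0))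
--     return {3: 'high', 2: 'medium', 1: 'low'}.get(best, 'unknown')
-- ===== Notes on version B (the rewrite author's own statement) =====
-- stated objective: idiomatic
-- what changed: Replaces the three separate membership scans over a materialised levels list with a single pass computing the numeric maximum priority, decoded back to a level name at the end.
import Mathlib
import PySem

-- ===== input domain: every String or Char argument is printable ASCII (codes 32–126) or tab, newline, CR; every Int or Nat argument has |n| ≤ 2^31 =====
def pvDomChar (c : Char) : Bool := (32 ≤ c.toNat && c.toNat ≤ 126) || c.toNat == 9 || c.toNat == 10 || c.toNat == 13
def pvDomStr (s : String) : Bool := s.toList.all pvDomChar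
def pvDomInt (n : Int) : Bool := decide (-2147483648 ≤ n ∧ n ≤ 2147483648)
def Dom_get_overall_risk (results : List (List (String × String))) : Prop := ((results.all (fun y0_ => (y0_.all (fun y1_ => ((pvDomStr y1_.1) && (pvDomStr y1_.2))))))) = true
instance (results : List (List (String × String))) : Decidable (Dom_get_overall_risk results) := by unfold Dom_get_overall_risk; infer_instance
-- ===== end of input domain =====

-- B computes the same overall risk in one pass via a numeric priority maximum instead of
-- three membership scans over a materialised levels list (objective: idiomatic).


-- dict lookup r['risk_level'] on an association list: first matching key (exact for a Python dict,
-- whose keys are unique); none = KeyError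
def pyLookup (r : List (String × String)) (k : String) : Option String :=
  (r.find? (fun p => p.1 == k)).map Prod.snd

-- ===== PORT A =====
def get_overall_risk (results : List (List (String × String))) : String :=
  let levels := results.map (fun r => pyLookup r "risk_level")
  if some "high" ∈ levels then "high"
  else if some "medium" ∈ levels then "medium"
  else if some "low" ∈ levels then "low"
  else "unknown"

-- ===== PORT B =====
-- prio.get(r['risk_level'], 0)
def prioOf (o : Option String) : Nat :=
  if o = some "high" then 3 else if o = some "medium" then 2 else if o = some "low" then 1 else 0

def get_overall_risk_alt (results : List (List (String × String))) : String :=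
  let best := results.foldl (fun b r => max b (prioOf (pyLookup r "risk_level"))) 0
  if best = 3 then "high" else if best = 2 then "medium" else if best = 1 then "low" else "unknown"

-- ===== PRECONDITION & SPEC =====
-- A raises KeyError when some result lacks the 'risk_level' key; Pre_ excludes exactly those inputs.
def Pre_get_overall_risk (results : List (List (String × String))) : Prop :=
  ∀ r ∈ results, pyLookup r "risk_level" ≠ none
instance (results : List (List (String × String))) : Decidable (Pre_get_overall_risk results) := by
  unfold Pre_get_overall_risk; infer_instance

def pvWitness_get_overall_risk : (List (List (String × String))) := [[("risk_level", "high")], [("risk_level", "low")]]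

def Spec_get_overall_risk (results : List (List (String × String))) (out : String) : Prop := out = get_overall_risk_alt results
instance (results : List (List (String × String))) (out : String) : Decidable (Spec_get_overall_risk results out) := by unfold Spec_get_overall_risk; infer_instance

-- ===== CLAIM (what is proved, stated in full; the proofs are below) =====
def Claim_equal_get_overall_risk : Prop := ∀ (results : List (List (String × String))), Dom_get_overall_risk results → Pre_get_overall_risk results → Spec_get_overall_risk results (get_overall_risk results)

-- ===== LEMMAS AND PROOFS =====

theorem foldl_max_acc (f : List (String × String) → Nat) :
    ∀ (L : List (List (String × String))) (a : Nat),
      L.foldl (fun b r => max b (f r)) a = max a (L.foldl (fun b r => max b (f r)) 0) := by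
  intro L
  induction L with
  | nil => intro a; simp
  | cons r L ih =>
    intro a
    simp only [List.foldl_cons]
    rw [ih (max a (f r)), ih (max 0 (f r))]
    omega

theorem best_eq (results : List (List (String × String))) :
    results.foldl (fun b r => max b (prioOf (pyLookup r "risk_level"))) 0 =
      (if some "high" ∈ results.map (fun r => pyLookup r "risk_level") then 3
       else if some "medium" ∈ results.map (fun r => pyLookup r "risk_level") then 2
       else if some "low" ∈ results.map (fun r => pyLookup r "risk_level") then 1
       else 0) := by
  induction results with
  | nil => simp
  | cons r L ih =>
    simp only [List.foldl_cons, List.map_cons, List.mem_cons]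
    rw [foldl_max_acc, ih]
    simp only [prioOf]
    split_ifs <;> simp_all <;> aesop

-- ===== VERDICT (by name: the statement is the Claim_ definition above) =====
theorem get_overall_risk_spec : Claim_equal_get_overall_risk := by
  intro results _ _
  show get_overall_risk results = get_overall_risk_alt results
  simp only [get_overall_risk, get_overall_risk_alt]
  rw [best_eq]
  split_ifs <;> simp_all
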